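-- pv_equiv track=rewrite | github.com/G0LDF0X/Python-Coding-Test-Study | jeongyun/PG_숫자카드나누기.py | solution
-- ===== SOURCE A (Python) =====
-- from math import gcd
-- from functools import reduce
--
-- def get_gcd(arr):
--     return reduce(gcd, arr)
--
-- def solution(arrayA, arrayB):
--     answer = 0
--
--     gcdA = get_gcd(arrayA)
--     gcdB = get_gcd(arrayB)
--
--     # arrayA의 공약수 중 arrayB를 하나도 나누지 못하는 수 => answer
--     for i in range(gcdA, 1,  -1):
--         if gcdA % i == 0:
--             flagB = True    # arrayB가 arrayA의 공약수로 나누어지는지 확인하기 위한 변수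
--             for b in arrayB:
--                 # 만약 arrayB 수 중 나누어지는 수가 있으면 false
--                 if b % i == 0:
--                     flagB = False
--             # 모든 arrayB가 안나누어질때 그 수를 answer로 저장 => answer는 최댓값 이므로 max
--             if flagB == True:
--                 answer = max(answer, i)
--
--     # arrayB의 공약수 중 arrayA를 하나도 나누지 못하는 수 => answer
--     for i in range(gcdB, 1, -1):
--         flagA = True
--         if gcdB % i == 0 :
--             for a in arrayA:
--                 if a % i == 0:
--                     flagA = False
--             if flagA == True:
--                 answer = max(answer, i)
--
--     return answer
-- ===== SOURCE B (Python) =====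
-- from math import gcd, isqrt
-- from functools import reduce
--
--
-- def _divisors(g):
--     # all positive divisors of g (g >= 2), found by trial division up to sqrt(g)
--     divs = []
--     for d in range(1, isqrt(g) + 1):
--         if g % d == 0:
--             divs.append(d)
--             divs.append(g // d)
--     return divs
--
--
-- def _best(g, other):
--     # largest divisor of g greater than 1 dividing no element of other (0 if none)
--     best = 0
--     if g > 1:
--         for d in _divisors(g):
--             if d > 1 and all(b % d != 0 for b in other):
--                 best = max(best, d)
--     return best
--
--
-- def solution(arrayA, arrayB):
--     gcdA = reduce(gcd, arrayA)
--     gcdB = reduce(gcd, arrayB)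
--     return max(_best(gcdA, arrayB), _best(gcdB, arrayA))
-- ===== Notes on version B (the rewrite author's own statement) =====
-- stated objective: faster
-- what changed: Instead of scanning every integer from each gcd down to 2 and testing the other array at each one, B enumerates the divisors of each gcd by trial division up to its square root and only tests the other array at actual divisors.
import Mathlib
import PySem

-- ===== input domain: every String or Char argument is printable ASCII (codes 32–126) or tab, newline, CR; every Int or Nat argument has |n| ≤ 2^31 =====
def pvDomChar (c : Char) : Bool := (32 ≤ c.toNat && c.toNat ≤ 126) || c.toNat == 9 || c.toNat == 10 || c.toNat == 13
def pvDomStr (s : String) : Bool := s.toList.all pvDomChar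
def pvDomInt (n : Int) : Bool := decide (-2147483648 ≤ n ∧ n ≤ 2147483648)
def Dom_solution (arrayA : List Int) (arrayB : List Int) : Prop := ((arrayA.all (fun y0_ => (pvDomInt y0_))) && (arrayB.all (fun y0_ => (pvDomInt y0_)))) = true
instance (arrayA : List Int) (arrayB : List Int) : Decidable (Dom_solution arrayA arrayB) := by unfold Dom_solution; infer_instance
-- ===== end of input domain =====

-- B replaces A's countdown scan from each gcd with trial-division divisor enumeration up to
-- the gcd's square root (objective: faster; measured).

-- ===== PORT A =====
-- math.gcd (two arguments)
def pyGcd (a b : Int) : Int := Int.ofNat (Nat.gcd a.natAbs b.natAbs)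

-- functools.reduce(gcd, arr); raises TypeError on [] (excluded by Pre_); 0 is a junk value there
def get_gcd (arr : List Int) : Int :=
  match arr with
  | [] => 0
  | h :: t => t.foldl pyGcd h

def solution (arrayA : List Int) (arrayB : List Int) : Int :=
  let gcdA := get_gcd arrayA
  let gcdB := get_gcd arrayB
  let answer : Int := 0
  let answer := (PySem.List.pyRange gcdA 1 (-1)).foldl (fun answer i =>
    if PySem.Int.mod gcdA i == 0 then
      let flagB := arrayB.foldl (fun flagB b => if PySem.Int.mod b i == 0 then false else flagB) true
      if flagB then max answer i else answer
    else answer) answer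
  let answer := (PySem.List.pyRange gcdB 1 (-1)).foldl (fun answer i =>
    let flagA := true
    if PySem.Int.mod gcdB i == 0 then
      let flagA := arrayA.foldl (fun flagA a => if PySem.Int.mod a i == 0 then false else flagA) flagA
      if flagA then max answer i else answer
    else answer) answer
  answer

-- ===== PORT B =====
-- _divisors(g): trial division up to isqrt(g) (g ≥ 2 at every call site)
def divisorsTrial (g : Int) : List Int :=
  (PySem.List.pyRange 1 ((Nat.sqrt g.toNat : Int) + 1) 1).foldl (fun divs d =>
    if PySem.Int.mod g d == 0 then divs ++ [d, PySem.Int.floordiv g d] else divs) []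

-- _best(g, other)
def bestDiv (g : Int) (other : List Int) : Int :=
  let best : Int := 0
  if 1 < g then
    (divisorsTrial g).foldl (fun best d =>
      if 1 < d ∧ other.all (fun b => PySem.Int.mod b d != 0) then max best d else best) best
  else best

def solution_alt (arrayA : List Int) (arrayB : List Int) : Int :=
  let gcdA := get_gcd arrayA
  let gcdB := get_gcd arrayB
  max (bestDiv gcdA arrayB) (bestDiv gcdB arrayA)

-- ===== PRECONDITION & SPEC =====
-- functools.reduce raises TypeError on an empty list, so A (and B) raise iff either array is empty.
def Pre_solution (arrayA : List Int) (arrayB : List Int) : Prop := arrayA ≠ [] ∧ arrayB ≠ []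
instance (arrayA : List Int) (arrayB : List Int) : Decidable (Pre_solution arrayA arrayB) := by unfold Pre_solution; infer_instance
def pvWitness_solution : List Int × List Int := ([12, 30], [10, 25])

def Spec_solution (arrayA : List Int) (arrayB : List Int) (out : Int) : Prop := out = solution_alt arrayA arrayB
instance (arrayA : List Int) (arrayB : List Int) (out : Int) : Decidable (Spec_solution arrayA arrayB out) := by unfold Spec_solution; infer_instance

-- ===== CLAIM (what is proved, stated in full; the proofs are below) =====
def Claim_equal_solution : Prop := ∀ (arrayA : List Int) (arrayB : List Int), Dom_solution arrayA arrayB → Pre_solution arrayA arrayB → Spec_solution arrayA arrayB (solution arrayA arrayB)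

-- ===== LEMMAS AND PROOFS =====

-- the common membership test: x divides no element of `other`
def noDiv (other : List Int) (x : Int) : Bool := other.all (fun b => PySem.Int.mod b x != 0)

-- upper-bound half of the foldl-max characterisation (the lower bounds are PySem.List.le_foldl_max)
theorem foldl_max_le (L : List Int) {a b : Int} (ha : a ≤ b) (h : ∀ x ∈ L, x ≤ b) :
    L.foldl max a ≤ b := by
  induction L generalizing a with
  | nil => exact ha
  | cons x t ih =>
      simp only [List.foldl_cons]
      exact ih (max_le ha (h x (by simp))) (fun y hy => h y (by simp [hy]))

theorem foldl_max_congr {L1 L2 : List Int} (hmem : ∀ x, x ∈ L1 ↔ x ∈ L2) (a : Int) :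
    L1.foldl max a = L2.foldl max a := by
  apply le_antisymm
  · exact foldl_max_le L1 (PySem.List.le_foldl_max L2 a).1
      (fun x hx => (PySem.List.le_foldl_max L2 a).2 x ((hmem x).1 hx))
  · exact foldl_max_le L2 (PySem.List.le_foldl_max L1 a).1
      (fun x hx => (PySem.List.le_foldl_max L1 a).2 x ((hmem x).2 hx))

theorem foldl_max_zero_max (L1 L2 : List Int) :
    L2.foldl max (L1.foldl max 0) = max (L1.foldl max 0) (L2.foldl max 0) := by
  apply le_antisymm
  · exact foldl_max_le L2 (le_max_left _ _)
      (fun x hx => le_trans ((PySem.List.le_foldl_max L2 0).2 x hx) (le_max_right _ _))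
  · apply max_le (PySem.List.le_foldl_max L2 _).1
    exact foldl_max_le L2
      (le_trans (PySem.List.le_foldl_max L1 0).1 (PySem.List.le_foldl_max L2 _).1)
      (fun x hx => (PySem.List.le_foldl_max L2 _).2 x hx)

-- A's inner loop over `other` computes noDiv
theorem flag_eq_noDiv (other : List Int) (i : Int) :
    other.foldl (fun f b => if PySem.Int.mod b i == 0 then false else f) true = noDiv other i := by
  rw [PySem.List.foldl_if_false_eq (fun b => PySem.Int.mod b i == 0)]
  simp [noDiv, List.all_eq_not_any_not, bne, Bool.not_not]

-- A's outer loop is a foldl max over the filtered countdown range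
theorem loopA_eq (g : Int) (other : List Int) (a0 : Int) :
    (PySem.List.pyRange g 1 (-1)).foldl (fun answer i =>
      if PySem.Int.mod g i == 0 then
        if other.foldl (fun f b => if PySem.Int.mod b i == 0 then false else f) true then
          max answer i
        else answer
      else answer) a0
    = ((PySem.List.pyRange g 1 (-1)).filter
        (fun i => PySem.Int.mod g i == 0 && noDiv other i)).foldl max a0 := by
  rw [← PySem.List.foldl_if_eq_foldl_filter
        (fun i => PySem.Int.mod g i == 0 && noDiv other i) max]
  apply PySem.List.foldl_congr_mem
  intro acc x _
  rw [flag_eq_noDiv]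
  by_cases h1 : PySem.Int.mod g x == 0 <;> by_cases h2 : noDiv other x <;> simp [h1, h2]

-- membership in A's filtered list
theorem mem_filterA (g : Int) (other : List Int) (x : Int) :
    x ∈ (PySem.List.pyRange g 1 (-1)).filter
        (fun i => PySem.Int.mod g i == 0 && noDiv other i)
    ↔ (1 < x ∧ x ≤ g ∧ x ∣ g ∧ noDiv other x = true) := by
  simp [List.mem_filter, PySem.List.mem_pyRange_neg_one, PySem.Int.mod_eq_zero_iff_dvd]
  tauto

-- membership in the trial-division divisor list
theorem mem_divisorsTrial {g : Int} (hg : 2 ≤ g) (x : Int) :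
    x ∈ divisorsTrial g ↔ (1 ≤ x ∧ x ∣ g) := by
  have hgpos : (0:Int) < g := by omega
  have hcast : ((g.toNat : Int)) = g := Int.toNat_of_nonneg (by omega)
  have h0 : divisorsTrial g =
      ((PySem.List.pyRange 1 ((Nat.sqrt g.toNat : Int) + 1) 1).filter
        (fun d => PySem.Int.mod g d == 0)).flatMap (fun d => [d, PySem.Int.floordiv g d]) := by
    unfold divisorsTrial
    rw [PySem.List.foldl_if_eq_foldl_filter (fun d => PySem.Int.mod g d == 0)
        (fun acc d => acc ++ [d, PySem.Int.floordiv g d]),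
        PySem.List.foldl_append_eq_flatMap]
    simp
  rw [h0]
  simp only [List.mem_flatMap, List.mem_filter, PySem.List.mem_pyRange_one,
    beq_iff_eq, PySem.Int.mod_eq_zero_iff_dvd, List.mem_cons,
    List.not_mem_nil, or_false]
  constructor
  · rintro ⟨d, ⟨⟨hd1, hdlt⟩, hdvd⟩, hx⟩
    have hdpos : (0:Int) < d := by omega
    have hfd : PySem.Int.floordiv g d = g / d := PySem.Int.floordiv_eq_ediv_of_pos hdpos
    rcases hx with rfl | rfl
    · exact ⟨hd1, hdvd⟩
    · rw [hfd]
      have hdg : d ≤ g := Int.le_of_dvd hgpos hdvd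
      refine ⟨?_, ⟨d, (Int.ediv_mul_cancel hdvd).symm⟩⟩
      rw [Int.le_ediv_iff_mul_le hdpos]
      omega
  · rintro ⟨hx1, hxdvd⟩
    have hxpos : (0:Int) < x := by omega
    have hxg : x ≤ g := Int.le_of_dvd hgpos hxdvd
    by_cases hxs : x ≤ (Nat.sqrt g.toNat : Int)
    · exact ⟨x, ⟨⟨hx1, by omega⟩, hxdvd⟩, Or.inl rfl⟩
    · rw [not_le] at hxs
      set q : Int := g / x with hq
      have hqmul : q * x = g := Int.ediv_mul_cancel hxdvd
      have hqdvd : q ∣ g := ⟨x, hqmul.symm⟩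
      have hq1 : 1 ≤ q := by
        rw [hq, Int.le_ediv_iff_mul_le hxpos]; omega
      have hgx : g < x * x := by
        have hsucc : (g.toNat : Int) < ((Nat.sqrt g.toNat : Int) + 1) * ((Nat.sqrt g.toNat : Int) + 1) := by
          exact_mod_cast Nat.lt_succ_sqrt g.toNat
        nlinarith
      have hqx : q < x := by
        rw [hq, Int.ediv_lt_iff_lt_mul hxpos]; exact hgx
      have hqq : q * q ≤ g := by nlinarith
      have hqs : q ≤ (Nat.sqrt g.toNat : Int) := by
        have hqc : ((q.toNat : Int)) = q := Int.toNat_of_nonneg (by omega)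
        have h2 : q.toNat * q.toNat ≤ g.toNat := by
          have : ((q.toNat * q.toNat : Nat) : Int) ≤ ((g.toNat : Nat) : Int) := by
            push_cast [hqc, hcast]; exact hqq
          exact_mod_cast this
        have := Nat.le_sqrt.mpr h2
        omega
      refine ⟨q, ⟨⟨hq1, by omega⟩, hqdvd⟩, Or.inr ?_⟩
      have hqpos : (0:Int) < q := by omega
      rw [PySem.Int.floordiv_eq_ediv_of_pos hqpos]
      have : g = q * x := hqmul.symm
      rw [this, Int.mul_ediv_cancel_left _ (by omega)]

-- both sides compute the same candidate set, so bestDiv matches A's loop from 0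
theorem side_eq (g : Int) (other : List Int) :
    ((PySem.List.pyRange g 1 (-1)).filter
        (fun i => PySem.Int.mod g i == 0 && noDiv other i)).foldl max 0
    = bestDiv g other := by
  unfold bestDiv
  by_cases hg : 1 < g
  · rw [if_pos hg,
      PySem.List.foldl_ite_eq_foldl_filter
        (fun d => 1 < d ∧ other.all (fun b => PySem.Int.mod b d != 0) = true) max]
    apply foldl_max_congr
    intro x
    rw [mem_filterA, List.mem_filter, mem_divisorsTrial (by omega)]
    simp only [decide_eq_true_eq]
    constructor
    · rintro ⟨h1, h2, h3, h4⟩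
      exact ⟨⟨by omega, h3⟩, h1, h4⟩
    · rintro ⟨⟨_, h3⟩, h1, h4⟩
      exact ⟨h1, Int.le_of_dvd (by omega) h3, h3, h4⟩
  · rw [if_neg hg, PySem.List.pyRange_neg_one_eq_nil (by omega)]
    simp

theorem solution_spec : Claim_equal_solution := by
  intro arrayA arrayB _ _
  show solution arrayA arrayB = solution_alt arrayA arrayB
  simp only [solution, solution_alt]
  rw [loopA_eq, loopA_eq, foldl_max_zero_max, side_eq, side_eq]
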